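-- pv_equiv track=rewrite | github.com/stavgaz/Semeval2026-Efficient-DimABSA | DimASQP/Zeroshot.py | get_original_span
-- ===== SOURCE A (Python) =====
-- import unicodedata
--
-- def get_original_span(full_text: str, predicted_span: str) -> str:
--     """Map predicted span back to exact substring in full_text using normalization."""
--     if not predicted_span:
--         return predicted_span
--     if predicted_span in full_text:
--         return predicted_span
--
--     full_text_norm = unicodedata.normalize("NFKC", full_text)
--     predicted_span_norm = unicodedata.normalize("NFKC", predicted_span)
--
--     full_text_nosp = "".join(c for c in full_text_norm if not c.isspace())
--     predicted_nosp = "".join(c for c in predicted_span_norm if not c.isspace())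
--
--     start_idx = full_text_nosp.find(predicted_nosp)
--     if start_idx == -1:
--         start_idx = full_text_nosp.lower().find(predicted_nosp.lower())
--
--     if start_idx != -1:
--         end_idx = start_idx + len(predicted_nosp)
--         current = 0
--         start_real, end_real = -1, -1
--
--         for i, c in enumerate(full_text_norm):
--             if c.isspace():
--                 continue
--             if current == start_idx:
--                 start_real = i
--             if current == end_idx - 1:
--                 end_real = i
--                 break
--             current += 1
--
--         if start_real != -1 and end_real != -1:
--             return full_text[start_real:end_real + 1]
--
--     return predicted_span
-- ===== SOURCE B (Python) =====
-- import unicodedata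
--
-- def get_original_span(full_text: str, predicted_span: str) -> str:
--     """Map predicted span back to exact substring in full_text using normalization."""
--     if not predicted_span:
--         return predicted_span
--     if predicted_span in full_text:
--         return predicted_span
--
--     full_text_norm = unicodedata.normalize("NFKC", full_text)
--     predicted_span_norm = unicodedata.normalize("NFKC", predicted_span)
--
--     full_text_nosp = "".join(c for c in full_text_norm if not c.isspace())
--     predicted_nosp = "".join(c for c in predicted_span_norm if not c.isspace())
--
--     start_idx = full_text_nosp.find(predicted_nosp)
--     if start_idx == -1:
--         start_idx = full_text_nosp.lower().find(predicted_nosp.lower())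
--
--     if start_idx != -1 and predicted_nosp:
--         # index table: non-space rank -> position in full_text_norm
--         positions = [i for i, c in enumerate(full_text_norm) if not c.isspace()]
--         end_idx = start_idx + len(predicted_nosp)
--         if end_idx <= len(positions):
--             return full_text[positions[start_idx]:positions[end_idx - 1] + 1]
--
--     return predicted_span
-- ===== Notes on version B (the rewrite author's own statement) =====
-- stated objective: simpler
-- what changed: B replaces A's counter loop over the full text (with incremental rank tracking, two sentinel variables and an early break) by a precomputed rank-to-position index table built with one comprehension and two direct lookups, guarded by a non-empty-span/length check instead of the sentinel tests.
import Mathlib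
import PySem

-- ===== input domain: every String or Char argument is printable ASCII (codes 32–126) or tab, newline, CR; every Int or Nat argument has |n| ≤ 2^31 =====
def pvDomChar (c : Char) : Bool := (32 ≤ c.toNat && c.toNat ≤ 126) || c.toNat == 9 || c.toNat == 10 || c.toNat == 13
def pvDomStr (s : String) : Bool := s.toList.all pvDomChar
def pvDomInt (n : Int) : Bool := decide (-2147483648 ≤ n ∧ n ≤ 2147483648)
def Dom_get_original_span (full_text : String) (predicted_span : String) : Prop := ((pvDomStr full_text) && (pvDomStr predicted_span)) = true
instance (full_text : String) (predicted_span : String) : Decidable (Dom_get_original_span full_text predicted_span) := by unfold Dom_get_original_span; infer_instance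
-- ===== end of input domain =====

-- B replaces A's counter loop over the text by a precomputed non-space-rank → position
-- index table with two direct lookups (objective: simpler decomposition, same cost).
-- On the ASCII domain claimed here, unicodedata.normalize("NFKC", s) is the identity;
-- both ports transliterate it as such (comment marks where this is exact).

-- ===== PORT A =====
-- A's for-loop over enumerate(full_text_norm) with counter `current`, early break at
-- end_idx-1; state (i, start_idx, end_idx, current, start_real, end_real).
def pvLoopA (cs : List Char) (i si ei cur sr er : Int) : Int × Int :=
  match cs with
  | [] => (sr, er)
  | c :: rest =>
    if PySem.Chars.isspace c then pvLoopA rest (i + 1) si ei cur sr er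
    else
      let sr' := if cur = si then i else sr
      if cur = ei - 1 then (sr', i)   -- `break`
      else pvLoopA rest (i + 1) si ei (cur + 1) sr' er

def get_original_span (full_text : String) (predicted_span : String) : String :=
  if predicted_span == "" then predicted_span
  else if PySem.Str.isIn predicted_span full_text then predicted_span
  else
    -- NFKC normalization is the identity on the printable-ASCII domain (exact there)
    let full_text_norm := full_text
    let predicted_span_norm := predicted_span
    let full_text_nosp := full_text_norm.toList.filter (fun c => !PySem.Chars.isspace c)
    let predicted_nosp := predicted_span_norm.toList.filter (fun c => !PySem.Chars.isspace c)
    let start_idx0 := PySem.Chars.find full_text_nosp predicted_nosp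
    let start_idx :=
      if start_idx0 = -1 then
        PySem.Chars.find (PySem.Chars.lower full_text_nosp) (PySem.Chars.lower predicted_nosp)
      else start_idx0
    if start_idx ≠ -1 then
      let end_idx := start_idx + (predicted_nosp.length : Int)
      let res := pvLoopA full_text_norm.toList 0 start_idx end_idx 0 (-1) (-1)
      if res.1 ≠ -1 ∧ res.2 ≠ -1 then
        PySem.Str.slice full_text (some res.1) (some (res.2 + 1))
      else predicted_span
    else predicted_span

-- ===== PORT B =====
def get_original_span_alt (full_text : String) (predicted_span : String) : String :=
  if predicted_span == "" then predicted_span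
  else if PySem.Str.isIn predicted_span full_text then predicted_span
  else
    -- NFKC normalization is the identity on the printable-ASCII domain (exact there)
    let full_text_norm := full_text
    let predicted_span_norm := predicted_span
    let full_text_nosp := full_text_norm.toList.filter (fun c => !PySem.Chars.isspace c)
    let predicted_nosp := predicted_span_norm.toList.filter (fun c => !PySem.Chars.isspace c)
    let start_idx0 := PySem.Chars.find full_text_nosp predicted_nosp
    let start_idx :=
      if start_idx0 = -1 then
        PySem.Chars.find (PySem.Chars.lower full_text_nosp) (PySem.Chars.lower predicted_nosp)
      else start_idx0
    if start_idx ≠ -1 ∧ predicted_nosp ≠ [] then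
      let positions := ((PySem.List.enumerate full_text_norm.toList 0).filter
        (fun p => !PySem.Chars.isspace p.2)).map (fun p => p.1)
      let end_idx := start_idx + (predicted_nosp.length : Int)
      if end_idx ≤ (positions.length : Int) then
        PySem.Str.slice full_text (some (PySem.List.pyGetD positions start_idx 0))
          (some (PySem.List.pyGetD positions (end_idx - 1) 0 + 1))
      else predicted_span
    else predicted_span

-- ===== PRECONDITION & SPEC =====
def Spec_get_original_span (full_text : String) (predicted_span : String) (out : String) : Prop := out = get_original_span_alt full_text predicted_span
instance (full_text : String) (predicted_span : String) (out : String) : Decidable (Spec_get_original_span full_text predicted_span out) := by unfold Spec_get_original_span; infer_instance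

-- ===== CLAIM (what is proved, stated in full; the proofs are below) =====
def Claim_equal_get_original_span : Prop := ∀ (full_text : String) (predicted_span : String), Dom_get_original_span full_text predicted_span → Spec_get_original_span full_text predicted_span (get_original_span full_text predicted_span)

-- ===== LEMMAS AND PROOFS =====

-- positions of the non-space characters of cs, indexed from i
def pvPos (cs : List Char) (i : Int) : List Int :=
  match cs with
  | [] => []
  | c :: rest =>
    if PySem.Chars.isspace c then pvPos rest (i + 1) else i :: pvPos rest (i + 1)

theorem pvPos_eq_positions (cs : List Char) (i : Int) :
    pvPos cs i = ((PySem.List.enumerate cs i).filter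
      (fun p => !PySem.Chars.isspace p.2)).map (fun p => p.1) := by
  induction cs generalizing i with
  | nil => simp [pvPos, PySem.List.enumerate_nil]
  | cons c rest ih =>
    rw [PySem.List.enumerate_cons]
    by_cases h : PySem.Chars.isspace c <;> simp [pvPos, h, ih]

theorem pvPos_length (cs : List Char) (i : Int) :
    (pvPos cs i).length = (cs.filter (fun c => !PySem.Chars.isspace c)).length := by
  induction cs generalizing i with
  | nil => rfl
  | cons c rest ih =>
    by_cases h : PySem.Chars.isspace c <;> simp [pvPos, h, ih]

theorem pvPos_getD_ge (cs : List Char) (i : Int) (k : Nat) (d : Int)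
    (hk : k < (pvPos cs i).length) : i ≤ (pvPos cs i).getD k d := by
  induction cs generalizing i k with
  | nil => simp [pvPos] at hk
  | cons c rest ih =>
    by_cases h : PySem.Chars.isspace c
    · simp only [pvPos, h, if_pos] at hk ⊢
      exact le_trans (by omega) (ih (i + 1) k hk)
    · simp only [pvPos, h, if_neg, Bool.false_eq_true, not_false_iff] at hk ⊢
      cases k with
      | zero => simp
      | succ k =>
        simp only [List.getD_cons_succ, List.length_cons] at hk ⊢
        exact le_trans (by omega) (ih (i + 1) k (by omega))

-- phase 2 of A's loop: the start index has already been passed (si < cur)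
theorem pvLoopA_phase2 (cs : List Char) (i si ei cur sr er : Int)
    (h1 : si < cur) (h2 : cur ≤ ei - 1) :
    pvLoopA cs i si ei cur sr er = (sr, (pvPos cs i).getD (ei - 1 - cur).toNat er) := by
  induction cs generalizing i cur sr with
  | nil => simp [pvLoopA, pvPos]
  | cons c rest ih =>
    by_cases hsp : PySem.Chars.isspace c
    · simp only [pvLoopA, hsp, if_pos, pvPos]
      exact ih (i + 1) cur sr h1 h2
    · simp only [pvLoopA, hsp, Bool.false_eq_true, if_neg, not_false_iff, pvPos]
      have hne : ¬ cur = si := by omega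
      simp only [hne, if_neg, not_false_iff]
      by_cases hend : cur = ei - 1
      · simp [hend]
      · simp only [hend, if_neg, not_false_iff]
        rw [ih (i + 1) (cur + 1) sr (by omega) (by omega)]
        have : (ei - 1 - cur).toNat = (ei - 1 - (cur + 1)).toNat + 1 := by omega
        simp [this]

-- phase 1: cur ≤ si ≤ ei - 1; the loop returns the two looked-up positions
theorem pvLoopA_eq_pos (cs : List Char) (i si ei cur sr er : Int)
    (h1 : cur ≤ si) (h2 : si ≤ ei - 1) :
    pvLoopA cs i si ei cur sr er =
      ((pvPos cs i).getD (si - cur).toNat sr, (pvPos cs i).getD (ei - 1 - cur).toNat er) := by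
  induction cs generalizing i cur sr with
  | nil => simp [pvLoopA, pvPos]
  | cons c rest ih =>
    by_cases hsp : PySem.Chars.isspace c
    · simp only [pvLoopA, hsp, if_pos, pvPos]
      exact ih (i + 1) cur sr h1
    · simp only [pvLoopA, hsp, Bool.false_eq_true, if_neg, not_false_iff, pvPos]
      by_cases hend : cur = ei - 1
      · have hsi : cur = si := by omega
        rw [if_pos hend, if_pos hsi]
        simp [show (si - cur).toNat = 0 by omega, show (ei - 1 - cur).toNat = 0 by omega]
      · simp only [hend, if_neg, not_false_iff]
        by_cases hs : cur = si
        · simp only [hs, if_pos]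
          rw [pvLoopA_phase2 rest (i + 1) si ei (si + 1) i er (by omega) (by omega)]
          have e1 : (si - si).toNat = 0 := by omega
          have e2 : (ei - 1 - si).toNat = (ei - 1 - (si + 1)).toNat + 1 := by omega
          simp [e2]
        · simp only [hs, if_neg, not_false_iff]
          rw [ih (i + 1) (cur + 1) sr (by omega)]
          have e1 : (si - cur).toNat = (si - (cur + 1)).toNat + 1 := by omega
          have e2 : (ei - 1 - cur).toNat = (ei - 1 - (cur + 1)).toNat + 1 := by omega
          simp [e1, e2]

-- degenerate loop (empty predicted_nosp): end_real is never set
theorem pvLoopA_snd_of_done (cs : List Char) (i si ei cur sr er : Int)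
    (h : ei - 1 < cur) : (pvLoopA cs i si ei cur sr er).2 = er := by
  induction cs generalizing i cur sr with
  | nil => simp [pvLoopA]
  | cons c rest ih =>
    by_cases hsp : PySem.Chars.isspace c
    · simp only [pvLoopA, hsp, if_pos]
      exact ih (i + 1) cur sr h
    · simp only [pvLoopA, hsp, Bool.false_eq_true, if_neg, not_false_iff]
      have hend : ¬ cur = ei - 1 := by omega
      simp only [hend, if_neg, not_false_iff]
      exact ih (i + 1) (cur + 1) _ (by omega)

-- a successful find fits inside the searched string
theorem pvFind_fits (s sub : List Char) (h : PySem.Chars.find s sub ≠ -1) :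
    (PySem.Chars.find s sub).toNat + sub.length ≤ s.length := by
  have h0 : 0 ≤ PySem.Chars.find s sub := by
    have := PySem.Chars.neg_one_le_find s sub; omega
  have hpre := (PySem.Chars.find_spec h0).1
  have := List.IsPrefix.length_le hpre
  have hle := PySem.Chars.find_le_length s sub
  simp only [List.length_drop] at this
  omega

theorem pvLower_length (cs : List Char) : (PySem.Chars.lower cs).length = cs.length := by
  simp [PySem.Chars.lower]

-- ===== VERDICT (by name: the statement is the Claim_ definition above) =====
theorem get_original_span_spec : Claim_equal_get_original_span := by
  intro full_text predicted_span _
  unfold Spec_get_original_span get_original_span get_original_span_alt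
  by_cases he : (predicted_span == "") = true
  · rw [if_pos he, if_pos he]
  · rw [if_neg he, if_neg he]
    by_cases hin : PySem.Str.isIn predicted_span full_text = true
    · rw [if_pos hin, if_pos hin]
    · rw [if_neg hin, if_neg hin]
      simp only [ne_eq]
      set fns := full_text.toList.filter (fun c => !PySem.Chars.isspace c) with hfns
      set pns := predicted_span.toList.filter (fun c => !PySem.Chars.isspace c) with hpns
      set si := (if PySem.Chars.find fns pns = -1 then
          PySem.Chars.find (PySem.Chars.lower fns) (PySem.Chars.lower pns)
        else PySem.Chars.find fns pns) with hsi
      have hge : -1 ≤ si := by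
        rw [hsi]; split <;> exact PySem.Chars.neg_one_le_find _ _
      by_cases hs : si = -1
      · rw [if_neg (by simp [hs]), if_neg (by simp [hs])]
      · by_cases hp : pns = []
        · -- empty predicted_nosp: A's loop never sets end_real; B's guard fails
          have h0 : si = 0 := by
            rw [hsi]
            by_cases hf : PySem.Chars.find fns pns = -1
            · rw [if_pos hf]
              simp [hp, PySem.Chars.lower, PySem.Chars.find_nil]
            · rw [if_neg hf]
              simp [hp, PySem.Chars.find_nil]
          have h2 : (pvLoopA full_text.toList 0 si (si + (pns.length : Int)) 0 (-1) (-1)).2 = -1 := by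
            apply pvLoopA_snd_of_done
            simp [hp, h0]
          rw [if_pos hs, if_neg (fun hcon => hcon.2 h2),
            if_neg (fun hcon : ¬ si = -1 ∧ ¬ pns = [] => hcon.2 hp)]
        · -- non-empty predicted_nosp: both sides look up the same two positions
          have hfit : si.toNat + pns.length ≤ fns.length := by
            rw [hsi]
            by_cases hf : PySem.Chars.find fns pns = -1
            · rw [hsi, if_pos hf] at hs
              have := pvFind_fits _ _ hs
              rw [if_pos hf]
              simpa [pvLower_length] using this
            · rw [if_neg hf]
              exact pvFind_fits _ _ hf
          have hlen1 : 1 ≤ pns.length := by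
            cases hq : pns with | nil => exact absurd hq hp | cons _ _ => simp
          have hsi0 : 0 ≤ si := by omega
          rw [if_pos hs, ← pvPos_eq_positions full_text.toList 0]
          set pos := pvPos full_text.toList 0 with hpos
          have hplen : pos.length = fns.length := by rw [hpos, pvPos_length, hfns]
          have hrange1 : si.toNat < pos.length := by rw [hplen]; omega
          have hrange2 : (si + (pns.length : Int) - 1).toNat < pos.length := by
            rw [hplen]; omega
          have hloop := pvLoopA_eq_pos full_text.toList 0 si (si + (pns.length : Int)) 0 (-1) (-1)
            (by omega) (by omega)
          rw [← hpos] at hloop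
          rw [hloop]
          have hsr : 0 ≤ pos.getD (si - 0).toNat (-1) := by
            have h := pvPos_getD_ge full_text.toList 0 (si - 0).toNat (-1)
              (by rw [← hpos, show (si - 0).toNat = si.toNat by omega]; exact hrange1)
            rw [← hpos] at h; exact h
          have her : 0 ≤ pos.getD (si + (pns.length : Int) - 1 - 0).toNat (-1) := by
            have h := pvPos_getD_ge full_text.toList 0 (si + (pns.length : Int) - 1 - 0).toNat (-1)
              (by rw [← hpos, show (si + (pns.length : Int) - 1 - 0).toNat
                = (si + (pns.length : Int) - 1).toNat by omega]; exact hrange2)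
            rw [← hpos] at h; exact h
          rw [if_pos (⟨show ¬ pos.getD (si - 0).toNat (-1) = -1 by omega,
            show ¬ pos.getD (si + (pns.length : Int) - 1 - 0).toNat (-1) = -1 by omega⟩ :
            ¬ _ = (-1 : Int) ∧ ¬ _ = (-1 : Int))]
          rw [if_pos ⟨hs, hp⟩]
          rw [if_pos (show si + (pns.length : Int) ≤ (pos.length : Int) by rw [hplen]; omega)]
          have hb1 : PySem.List.pyGetD pos si 0 = pos.getD (si - 0).toNat (-1) := by
            rw [PySem.List.pyGetD_eq_getElem pos 0 hsi0 (by omega)]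
            rw [show (si - 0).toNat = si.toNat by omega, List.getD_eq_getElem _ (-1) hrange1]
          have hb2 : PySem.List.pyGetD pos (si + (pns.length : Int) - 1) 0
              = pos.getD (si + (pns.length : Int) - 1 - 0).toNat (-1) := by
            rw [PySem.List.pyGetD_eq_getElem pos 0 (by omega) (by omega)]
            rw [show (si + (pns.length : Int) - 1 - 0).toNat
              = (si + (pns.length : Int) - 1).toNat by omega,
              List.getD_eq_getElem _ (-1) hrange2]
          rw [hb1, hb2]
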